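-- pv_equiv track=rewrite | github.com/garfileds/networkRecovery | adoug/clustering.py | byUniqueHop
-- ===== SOURCE A (Python) =====
-- def getLabel(target, source):
--     for i in range(len(source)):
--         if target == source[i]:
--             return i
--
-- def byUniqueHop(hopSet):
--     uniqueHop = []
--     nodeMap_hop = []
--     hopLabelDict = {}
--
--     for node in hopSet:
--         if hopSet[node] not in uniqueHop:
--             uniqueHop.append(hopSet[node])
--             nodeMap_hop.append(node)
--
--     for node in hopSet:
--         label = getLabel(hopSet[node], uniqueHop)
--         hopLabelDict[node] = label
--
--     return (hopLabelDict, nodeMap_hop)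
-- ===== SOURCE B (Python) =====
-- def byUniqueHop(hopSet):
--     labelDict = {}
--     hopLabelDict = {}
--     nodeMap_hop = []
--     for node, hop in hopSet.items():
--         if hop not in labelDict:
--             labelDict[hop] = len(labelDict)
--             nodeMap_hop.append(node)
--         hopLabelDict[node] = labelDict[hop]
--     return (hopLabelDict, nodeMap_hop)
-- ===== Notes on version B (the rewrite author's own statement) =====
-- stated objective: faster
-- what changed: Replaces A's two passes (build a unique-value list, then rescan it with a linear getLabel search per node) by one pass keeping a value->label dict, so the inner list scans disappear.
import Mathlib
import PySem

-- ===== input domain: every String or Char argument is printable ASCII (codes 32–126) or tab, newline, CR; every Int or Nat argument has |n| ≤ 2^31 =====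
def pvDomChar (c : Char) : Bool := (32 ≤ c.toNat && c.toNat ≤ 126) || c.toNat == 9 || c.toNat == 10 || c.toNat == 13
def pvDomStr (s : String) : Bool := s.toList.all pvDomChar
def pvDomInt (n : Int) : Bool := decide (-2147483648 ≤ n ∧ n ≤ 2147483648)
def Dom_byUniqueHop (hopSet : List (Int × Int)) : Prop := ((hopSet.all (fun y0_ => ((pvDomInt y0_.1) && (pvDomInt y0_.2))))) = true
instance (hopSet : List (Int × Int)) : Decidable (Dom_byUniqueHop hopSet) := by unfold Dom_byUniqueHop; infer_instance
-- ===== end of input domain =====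

-- B replaces A's two passes (unique-value list + a linear getLabel scan per node) by one pass
-- over the dict keeping a value→label dictionary; objective: faster (one pass, no inner scans).

-- ===== PORT A =====
-- getLabel(target, source): linear scan; Python returns None when absent (never hit in A's use)
def getLabelA (target : Int) : List Int → Int → Option Int
  | [], _ => none
  | s :: ss, i => if target = s then some i else getLabelA target ss (i + 1)

def byUniqueHop (hopSet : List (Int × Int)) : (List (Int × Int)) × List Int :=
  let d := PySem.Dict.ofList hopSet          -- the dict argument (overwrite-in-place semantics)
  -- first loop: for node in hopSet: if hopSet[node] not in uniqueHop: append value and node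
  let st := d.keys.foldl (fun (st : List Int × List Int) node =>
      if d.getD node 0 ∈ st.1 then st
      else (st.1 ++ [d.getD node 0], st.2 ++ [node])) ([], [])
  -- second loop: hopLabelDict[node] = getLabel(hopSet[node], uniqueHop)
  -- (node always a key of d, so getD's default is never used; the label is always found,
  --  so getLabelA never returns none here and .getD 0 is exact)
  let hld := d.keys.foldl (fun (h : PySem.Dict Int Int) node =>
      h.insert node ((getLabelA (d.getD node 0) st.1 0).getD 0)) PySem.Dict.empty
  (hld.items, st.2)

-- ===== PORT B =====
def byUniqueHop_alt (hopSet : List (Int × Int)) : (List (Int × Int)) × List Int :=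
  let d := PySem.Dict.ofList hopSet
  -- single pass: for node, hop in hopSet.items(): maintain labelDict, hopLabelDict, nodeMap_hop
  let st := d.items.foldl
      (fun (st : PySem.Dict Int Int × PySem.Dict Int Int × List Int) p =>
        if st.1.contains p.2 then
          (st.1, st.2.1.insert p.1 (st.1.getD p.2 0), st.2.2)
        else
          let lab' := st.1.insert p.2 (st.1.size : Int)
          (lab', st.2.1.insert p.1 (lab'.getD p.2 0), st.2.2 ++ [p.1]))
      (PySem.Dict.empty, PySem.Dict.empty, [])
  (st.2.1.items, st.2.2)

-- ===== PRECONDITION & SPEC =====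
def Spec_byUniqueHop (hopSet : List (Int × Int)) (out : (List (Int × Int)) × List Int) : Prop := out = byUniqueHop_alt hopSet
instance (hopSet : List (Int × Int)) (out : (List (Int × Int)) × List Int) : Decidable (Spec_byUniqueHop hopSet out) := by unfold Spec_byUniqueHop; infer_instance

-- ===== CLAIM (what is proved, stated in full; the proofs are below) =====
def Claim_equal_byUniqueHop : Prop := ∀ (hopSet : List (Int × Int)), Dom_byUniqueHop hopSet → Spec_byUniqueHop hopSet (byUniqueHop hopSet)

-- ===== LEMMAS AND PROOFS =====

-- a fold over d.keys that looks each key up again is a fold over d.items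
theorem keysFold_eq_itemsFold {β : Type} (d : PySem.Dict Int Int) (hnd : d.keys.Nodup)
    (F : β → Int → Int → β) (init : β) :
    d.keys.foldl (fun st node => F st node (d.getD node 0)) init
      = d.items.foldl (fun st p => F st p.1 p.2) init := by
  have hk : d.keys = d.items.map (·.1) := rfl
  rw [hk, List.foldl_map]
  exact PySem.List.foldl_congr_mem d.items _ _ init
    (fun acc p hp => by
      have : (p.1, p.2) ∈ d.items := by simpa using hp
      rw [PySem.Dict.getD_of_mem_items d this hnd 0])

-- A's first loop as a named function
def loopA1 (l : List (Int × Int)) (u nm : List Int) : List Int × List Int :=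
  l.foldl (fun st p => if p.2 ∈ st.1 then st else (st.1 ++ [p.2], st.2 ++ [p.1])) (u, nm)

theorem loopA1_extend (l : List (Int × Int)) (u nm : List Int) :
    ∃ ext, (loopA1 l u nm).1 = u ++ ext := by
  induction l generalizing u nm with
  | nil => exact ⟨[], by simp [loopA1]⟩
  | cons p l ih =>
    by_cases hm : p.2 ∈ u
    · simpa [loopA1, hm] using ih u nm
    · obtain ⟨ext, hext⟩ := ih (u ++ [p.2]) (nm ++ [p.1])
      exact ⟨[p.2] ++ ext, by simpa [loopA1, hm] using hext⟩

theorem getLabelA_append_of_mem (v : Int) (u ext : List Int) (hv : v ∈ u) (i : Int) :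
    getLabelA v (u ++ ext) i = getLabelA v u i := by
  induction u generalizing i with
  | nil => cases hv
  | cons s ss ih =>
    by_cases h : v = s
    · simp [getLabelA, h]
    · have : v ∈ ss := by
        rcases List.mem_cons.mp hv with h' | h'
        · exact absurd h' h
        · exact h'
      simp [getLabelA, h, ih this]

theorem getLabelA_self_append (v : Int) (u : List Int) (hv : v ∉ u) (i : Int) :
    getLabelA v (u ++ [v]) i = some (i + u.length) := by
  induction u generalizing i with
  | nil => simp [getLabelA]
  | cons s ss ih =>
    have hns : v ≠ s := fun h => hv (h ▸ List.mem_cons_self)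
    have hss : v ∉ ss := fun h => hv (List.mem_cons_of_mem _ h)
    rw [List.cons_append]
    simp only [getLabelA, if_neg hns, ih hss, List.length_cons]
    congr 1
    push_cast
    ring

-- the single-pass B loop computes A's two loops
theorem main_loop (l : List (Int × Int)) (u nm : List Int)
    (lab : PySem.Dict Int Int) (h : PySem.Dict Int Int)
    (hc : ∀ v, lab.contains v = decide (v ∈ u))
    (hg : ∀ v, v ∈ u → lab.getD v 0 = (getLabelA v u 0).getD 0)
    (hs : (lab.size : Int) = u.length) :
    (l.foldl
      (fun (st : PySem.Dict Int Int × PySem.Dict Int Int × List Int) p =>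
        if st.1.contains p.2 then
          (st.1, st.2.1.insert p.1 (st.1.getD p.2 0), st.2.2)
        else
          let lab' := st.1.insert p.2 (st.1.size : Int)
          (lab', st.2.1.insert p.1 (lab'.getD p.2 0), st.2.2 ++ [p.1]))
      (lab, h, nm)).2
    = (l.foldl (fun hh p =>
          hh.insert p.1 ((getLabelA p.2 (loopA1 l u nm).1 0).getD 0)) h,
       (loopA1 l u nm).2) := by
  induction l generalizing u nm lab h with
  | nil => simp [loopA1]
  | cons p l ih =>
    by_cases hm : p.2 ∈ u
    · -- seen value: label dict unchanged
      have hcontains : lab.contains p.2 = true := by rw [hc]; simpa using hm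
      have hU : loopA1 (p :: l) u nm = loopA1 l u nm := by simp [loopA1, hm]
      obtain ⟨ext, hext⟩ := loopA1_extend l u nm
      have hval : lab.getD p.2 0 = (getLabelA p.2 (loopA1 l u nm).1 0).getD 0 := by
        rw [hg p.2 hm, hext, getLabelA_append_of_mem p.2 u ext hm]
      rw [List.foldl_cons, if_pos hcontains, hU, List.foldl_cons, ← hval]
      exact ih u nm lab _ hc hg hs
    · -- new value: append it with the next label
      have hcontains : lab.contains p.2 = false := by rw [hc]; simpa using hm
      have hU : loopA1 (p :: l) u nm = loopA1 l (u ++ [p.2]) (nm ++ [p.1]) := by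
        simp [loopA1, hm]
      obtain ⟨ext, hext⟩ := loopA1_extend l (u ++ [p.2]) (nm ++ [p.1])
      have hlab' : (lab.insert p.2 (lab.size : Int)).getD p.2 0 = (u.length : Int) := by
        rw [PySem.Dict.getD_insert]; simp [hs]
      have hidx : ((getLabelA p.2 (loopA1 l (u ++ [p.2]) (nm ++ [p.1])).1 0).getD 0 : Int)
          = (u.length : Int) := by
        rw [hext, getLabelA_append_of_mem p.2 (u ++ [p.2]) ext (by simp) 0,
          getLabelA_self_append p.2 u hm 0]
        simp
      rw [List.foldl_cons, if_neg (by simp [hcontains]), hU, List.foldl_cons, hidx, ← hlab']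
      refine ih (u ++ [p.2]) (nm ++ [p.1]) (lab.insert p.2 (lab.size : Int)) _ ?_ ?_ ?_
      · intro v
        rw [PySem.Dict.contains_insert, hc]
        by_cases hv : v = p.2 <;> simp [hv]
      · intro v hv
        rw [PySem.Dict.getD_insert]
        by_cases hvp : v = p.2
        · subst hvp
          rw [if_pos rfl, getLabelA_self_append p.2 u hm 0]
          simp [hs]
        · have hvu : v ∈ u := by
            rcases List.mem_append.mp hv with h' | h'
            · exact h'
            · exact absurd (by simpa using h') hvp
          rw [if_neg hvp, hg v hvu, getLabelA_append_of_mem v u [p.2] hvu 0]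
      · rw [PySem.Dict.size_insert, if_neg (by simp [hcontains])]
        push_cast
        rw [hs]
        simp

-- the two ports agree for any dict
theorem ports_eq (d : PySem.Dict Int Int) (hnd : d.keys.Nodup) :
    (let st := d.keys.foldl (fun (st : List Int × List Int) node =>
        if d.getD node 0 ∈ st.1 then st
        else (st.1 ++ [d.getD node 0], st.2 ++ [node])) ([], [])
     let hld := d.keys.foldl (fun (h : PySem.Dict Int Int) node =>
        h.insert node ((getLabelA (d.getD node 0) st.1 0).getD 0)) PySem.Dict.empty
     ((hld.items, st.2) : (List (Int × Int)) × List Int))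
    = (let st := d.items.foldl
        (fun (st : PySem.Dict Int Int × PySem.Dict Int Int × List Int) p =>
          if st.1.contains p.2 then
            (st.1, st.2.1.insert p.1 (st.1.getD p.2 0), st.2.2)
          else
            let lab' := st.1.insert p.2 (st.1.size : Int)
            (lab', st.2.1.insert p.1 (lab'.getD p.2 0), st.2.2 ++ [p.1]))
        (PySem.Dict.empty, PySem.Dict.empty, [])
       ((st.2.1.items, st.2.2) : (List (Int × Int)) × List Int)) := by
  have hempty_c : ∀ v : Int, (PySem.Dict.empty : PySem.Dict Int Int).contains v
      = decide (v ∈ ([] : List Int)) := by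
    intro v; simp [PySem.Dict.contains_empty]
  have hempty_g : ∀ v : Int, v ∈ ([] : List Int) →
      (PySem.Dict.empty : PySem.Dict Int Int).getD v 0
        = ((getLabelA v [] 0).getD 0 : Int) := by
    intro v hv; simp at hv
  have hempty_s : (((PySem.Dict.empty : PySem.Dict Int Int).size : Int))
      = (([] : List Int).length : Int) := by
    simp [PySem.Dict.size_empty]
  have hmain := main_loop d.items [] [] PySem.Dict.empty PySem.Dict.empty
      hempty_c hempty_g hempty_s
  dsimp only
  rw [keysFold_eq_itemsFold d hnd
        (fun (st : List Int × List Int) node v =>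
          if v ∈ st.1 then st else (st.1 ++ [v], st.2 ++ [node])) ([], [])]
  have hA1 : d.items.foldl
      (fun (st : List Int × List Int) p =>
        if p.2 ∈ st.1 then st else (st.1 ++ [p.2], st.2 ++ [p.1])) ([], [])
      = loopA1 d.items [] [] := rfl
  rw [hA1]
  rw [keysFold_eq_itemsFold d hnd
        (fun (h : PySem.Dict Int Int) node v =>
          h.insert node ((getLabelA v (loopA1 d.items [] []).1 0).getD 0)) PySem.Dict.empty]
  rw [Prod.ext_iff] at hmain
  obtain ⟨h1, h2⟩ := hmain
  simp only at h1 h2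
  rw [h1, h2]

-- ===== VERDICT (by name: the statement is the Claim_ definition above) =====
theorem byUniqueHop_spec : Claim_equal_byUniqueHop :=
  fun hopSet _ => ports_eq (PySem.Dict.ofList hopSet) (PySem.Dict.nodup_keys_ofList hopSet)
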